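-- pv_equiv track=rewrite | github.com/opnfv/yardstick | yardstick/network_services/traffic_profile/ixia_rfc2544.py | _get_summary_pppoe_subs_counters
-- ===== SOURCE A (Python) =====
-- def _get_summary_pppoe_subs_counters(samples):
--     result = {}
--     keys = ['SessionsUp',
--             'SessionsDown',
--             'SessionsNotStarted',
--             'SessionsTotal']
--     for key in keys:
--         result[key] = \
--             sum([samples[port][key] for port in samples
--                  if key in samples[port]])
--     return result
-- ===== SOURCE B (Python) =====
-- def _get_summary_pppoe_subs_counters(samples):
--     # Aggregate every counter present in one flat pass over all (key, value)
--     # items of all ports, then project the four session keys from the totals.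
--     totals = {}
--     for port_data in samples.values():
--         for key, value in port_data.items():
--             totals[key] = totals.get(key, 0) + value
--     return {key: totals.get(key, 0)
--             for key in ('SessionsUp', 'SessionsDown',
--                         'SessionsNotStarted', 'SessionsTotal')}
-- ===== Notes on version B (the rewrite author's own statement) =====
-- stated objective: alternative
-- what changed: Instead of scanning the ports once per session key with a membership test, B aggregates every counter present into a totals dict in one flat pass over all (key, value) items of all ports, then projects the four session keys from that index.
import Mathlib
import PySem

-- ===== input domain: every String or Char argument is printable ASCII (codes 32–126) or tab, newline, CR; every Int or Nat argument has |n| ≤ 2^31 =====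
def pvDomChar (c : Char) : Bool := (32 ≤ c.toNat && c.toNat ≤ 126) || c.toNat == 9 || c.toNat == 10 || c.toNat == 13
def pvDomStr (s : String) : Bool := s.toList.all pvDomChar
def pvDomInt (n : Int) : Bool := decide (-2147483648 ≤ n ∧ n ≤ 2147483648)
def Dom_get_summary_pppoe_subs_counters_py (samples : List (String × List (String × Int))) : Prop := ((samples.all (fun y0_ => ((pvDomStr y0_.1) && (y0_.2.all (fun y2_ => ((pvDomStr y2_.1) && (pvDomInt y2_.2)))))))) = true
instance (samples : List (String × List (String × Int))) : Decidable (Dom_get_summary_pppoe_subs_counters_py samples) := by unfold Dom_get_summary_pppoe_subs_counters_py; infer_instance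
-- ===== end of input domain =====

-- B replaces A's per-key scans of the ports by one flat pass over all (key, value)
-- items building a totals index, then projects the four session keys from it.


-- ===== PORT A =====
-- `for port in samples` iterates the dict's keys; `samples[port]` / `samples[port][key]`
-- are lookups (first match in the association-list convention).
-- The comprehension `[samples[port][key] for port in samples if key in samples[port]]`:
def pvListCompA (samples : List (String × List (String × Int))) (key : String) : List Int :=
  (samples.map Prod.fst).filterMap (fun port =>
    match samples.lookup port with
    | some pd => if (pd.lookup key).isSome then pd.lookup key else none
    | none => none)

def get_summary_pppoe_subs_counters_py (samples : List (String × List (String × Int))) : List (String × Int) :=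
  let keys := ["SessionsUp", "SessionsDown", "SessionsNotStarted", "SessionsTotal"]
  -- result = {}; for key in keys: result[key] = sum([...]) — four fresh keys appended in order
  let result : PySem.Dict String Int :=
    keys.foldl (fun res key => res.insert key (pvListCompA samples key).sum) PySem.Dict.empty
  result.items

-- ===== PORT B =====
-- totals = {}; for port_data in samples.values(): for key, value in port_data.items():
--   totals[key] = totals.get(key, 0) + value   — i.e. Dict.modify key 0 (· + value)
def pvTotals (samples : List (String × List (String × Int))) : PySem.Dict String Int :=
  samples.foldl (fun t p => p.2.foldl (fun t kv => t.modify kv.1 0 (· + kv.2)) t) PySem.Dict.empty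

def get_summary_pppoe_subs_counters_py_alt (samples : List (String × List (String × Int))) : List (String × Int) :=
  let totals := pvTotals samples
  -- {key: totals.get(key, 0) for key in (…four keys…)} — four fresh keys in order
  ["SessionsUp", "SessionsDown", "SessionsNotStarted", "SessionsTotal"].map
    (fun key => (key, totals.getD key 0))

-- ===== PRECONDITION & SPEC =====
-- Pre_ excludes only association lists with a duplicate key (in the outer dict or
-- in an inner dict): those cannot arise from Python dicts, so no input A accepts
-- is excluded; with duplicates A's first-match lookups and B's item sums are both accidental.
def Pre_get_summary_pppoe_subs_counters_py (samples : List (String × List (String × Int))) : Prop :=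
  (samples.map Prod.fst).Nodup ∧ ∀ p ∈ samples, (p.2.map Prod.fst).Nodup
instance (samples : List (String × List (String × Int))) : Decidable (Pre_get_summary_pppoe_subs_counters_py samples) := by unfold Pre_get_summary_pppoe_subs_counters_py; infer_instance

def pvWitness_get_summary_pppoe_subs_counters_py : (List (String × List (String × Int))) :=
  [("xe0", [("SessionsUp", 1), ("SessionsTotal", 2)]), ("xe1", [("SessionsUp", 3), ("Other", 9)])]

def Spec_get_summary_pppoe_subs_counters_py (samples : List (String × List (String × Int))) (out : List (String × Int)) : Prop := out = get_summary_pppoe_subs_counters_py_alt samples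
instance (samples : List (String × List (String × Int))) (out : List (String × Int)) : Decidable (Spec_get_summary_pppoe_subs_counters_py samples out) := by unfold Spec_get_summary_pppoe_subs_counters_py; infer_instance

-- ===== CLAIM (what is proved, stated in full; the proofs are below) =====
def Claim_equal_get_summary_pppoe_subs_counters_py : Prop := ∀ (samples : List (String × List (String × Int))), Dom_get_summary_pppoe_subs_counters_py samples → Pre_get_summary_pppoe_subs_counters_py samples → Spec_get_summary_pppoe_subs_counters_py samples (get_summary_pppoe_subs_counters_py samples)

-- ===== LEMMAS AND PROOFS =====

-- one inner fold adds, at key k, the sum of pd's values carrying key k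
theorem pvInnerFold_getD (pd : List (String × Int)) (t : PySem.Dict String Int) (k : String) :
    (pd.foldl (fun t kv => t.modify kv.1 0 (· + kv.2)) t).getD k 0
      = t.getD k 0 + ((pd.filter (fun kv => kv.1 == k)).map Prod.snd).sum := by
  induction pd generalizing t with
  | nil => simp
  | cons kv rest ih =>
      by_cases h : kv.1 = k
      · subst h
        simp [ih, PySem.Dict.getD_modify_self]
        ring
      · rw [List.foldl_cons, ih, PySem.Dict.getD_modify_of_ne _ _ _ (Ne.symm h)]
        simp [h]

-- the totals index at key k sums, over the ports, each port's values carrying key k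
theorem pvTotals_getD (samples : List (String × List (String × Int))) (k : String) :
    (pvTotals samples).getD k 0
      = (samples.map (fun p => ((p.2.filter (fun kv => kv.1 == k)).map Prod.snd).sum)).sum := by
  unfold pvTotals
  have main : ∀ (l : List (String × List (String × Int))) (t : PySem.Dict String Int),
      (l.foldl (fun t p => p.2.foldl (fun t kv => t.modify kv.1 0 (· + kv.2)) t) t).getD k 0
        = t.getD k 0 + (l.map (fun p => ((p.2.filter (fun kv => kv.1 == k)).map Prod.snd).sum)).sum := by
    intro l
    induction l with
    | nil => simp
    | cons p rest ih =>
        intro t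
        simp [ih, pvInnerFold_getD]
        ring
  simpa using main samples PySem.Dict.empty

-- with no duplicate keys in pd, that per-port sum is the first-match lookup (or 0)
theorem pvFilterSum_lookup (pd : List (String × Int)) (k : String)
    (hnd : (pd.map Prod.fst).Nodup) :
    ((pd.filter (fun kv => kv.1 == k)).map Prod.snd).sum = (pd.lookup k).getD 0 := by
  induction pd with
  | nil => simp
  | cons kv rest ih =>
      simp only [List.map_cons, List.nodup_cons] at hnd
      by_cases h : kv.1 = k
      · subst h
        have hnone : rest.filter (fun kv' => kv'.1 == kv.1) = [] := by
          apply List.filter_eq_nil_iff.mpr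
          intro x hx hbeq
          exact hnd.1 ((eq_of_beq hbeq) ▸ List.mem_map_of_mem hx)
        simp [List.lookup, hnone]
      · have hb : (k == kv.1) = false := by simp [Ne.symm h]
        simp [h, List.lookup, ih hnd.2, hb]

-- with no duplicate ports, A's comprehension sums each port's own first-match value
theorem pvListCompA_sum (samples : List (String × List (String × Int))) (key : String)
    (hnd : (samples.map Prod.fst).Nodup) :
    (pvListCompA samples key).sum
      = (samples.map (fun p => (p.2.lookup key).getD 0)).sum := by
  induction samples with
  | nil => rfl
  | cons p rest ih =>
      simp only [List.map_cons, List.nodup_cons] at hnd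
      unfold pvListCompA
      simp only [List.map_cons, List.filterMap_cons]
      have hhead : List.lookup p.1 (p :: rest) = some p.2 := by
        cases p; simp [List.lookup]
      have htail : (rest.map Prod.fst).filterMap (fun port =>
          match (p :: rest).lookup port with
          | some pd => if (pd.lookup key).isSome then pd.lookup key else none
          | none => none)
          = pvListCompA rest key := by
        unfold pvListCompA
        apply List.filterMap_congr
        intro q hq
        have hne : ¬ (q == p.1) = true := by
          simp only [beq_iff_eq]
          intro he; exact hnd.1 (he ▸ hq)
        cases p; simp [List.lookup, hne]
      rw [htail]
      cases hk : p.2.lookup key with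
      | none => simpa [hhead, hk] using ih hnd.2
      | some v => simp [hhead, hk, ih hnd.2]

-- ===== VERDICT (by name: the statement is the Claim_ definition above) =====
theorem get_summary_pppoe_subs_counters_py_spec : Claim_equal_get_summary_pppoe_subs_counters_py := by
  intro samples _ hpre
  obtain ⟨hout, hin⟩ := hpre
  show get_summary_pppoe_subs_counters_py samples = get_summary_pppoe_subs_counters_py_alt samples
  have hkey : ∀ k : String,
      (pvListCompA samples k).sum = (pvTotals samples).getD k 0 := by
    intro k
    rw [pvListCompA_sum samples k hout, pvTotals_getD]
    congr 1
    apply List.map_congr_left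
    intro p hp
    exact (pvFilterSum_lookup p.2 k (hin p hp)).symm
  unfold get_summary_pppoe_subs_counters_py get_summary_pppoe_subs_counters_py_alt
  simp [PySem.Dict.insert, PySem.Dict.empty, hkey]
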